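-- pv_equiv track=rewrite | github.com/hpedrobs/pronfes | nfe/tools.py | formatarMask
-- ===== SOURCE A (Python) =====
-- def formatarMask(text, mask):
--     _i = 0
--     _result = ""
--     for _m in range(len(mask)):
--         if mask[_m] == "9":
--             if len(text) >= _i + 1:
--                 _result += text[_i]
--                 _i += 1
--             else:
--                 break
--         elif len(text) >= _i + 1:
--             _result += mask[_m]
--     return _result
-- ===== SOURCE B (Python) =====
-- def formatarMask(text, mask):
--     out = []
--     mi = 0
--     n = len(mask)
--     for ch in text:
--         while mi < n and mask[mi] != "9":
--             out.append(mask[mi])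
--             mi += 1
--         if mi >= n:
--             break
--         out.append(ch)
--         mi += 1
--     return "".join(out)
-- ===== Notes on version B (the rewrite author's own statement) =====
-- stated objective: alternative
-- what changed: B drives the loop over the text characters with a mask pointer and an inner literal-flushing while, instead of A's loop over the mask with a text index and per-literal exhaustion checks.
import Mathlib
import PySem

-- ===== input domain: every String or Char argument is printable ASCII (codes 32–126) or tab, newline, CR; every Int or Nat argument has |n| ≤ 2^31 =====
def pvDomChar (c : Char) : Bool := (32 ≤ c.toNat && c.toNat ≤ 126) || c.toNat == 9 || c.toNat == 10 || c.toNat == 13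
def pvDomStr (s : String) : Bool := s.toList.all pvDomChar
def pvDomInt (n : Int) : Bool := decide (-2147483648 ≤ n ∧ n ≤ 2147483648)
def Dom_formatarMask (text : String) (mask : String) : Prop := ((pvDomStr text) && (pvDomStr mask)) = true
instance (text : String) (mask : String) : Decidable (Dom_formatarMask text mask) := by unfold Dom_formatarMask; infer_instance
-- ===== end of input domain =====

-- ===== PORT A =====
-- B restructures the loop: text-driven with a mask pointer, instead of A's mask-driven scan (objective: alternative decomposition, same cost).
-- goA: A's loop over the mask, state = text index i and accumulated chars (break on '9' with text exhausted)
def goA (text : List Char) (ms : List Char) (i : Nat) (acc : List Char) : List Char :=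
  match ms with
  | [] => acc
  | m :: rest =>
    if m = '9' then
      if h : i < text.length then goA text rest (i + 1) (acc ++ [text[i]])
      else acc
    else
      if i < text.length then goA text rest i (acc ++ [m])
      else goA text rest i acc

def formatarMask (text : String) (mask : String) : String :=
  String.ofList (goA text.toList mask.toList 0 [])

-- ===== PORT B =====
-- emitLits: B's inner while — flush mask literals up to the next '9' (or mask end); returns remaining mask and acc
def emitLits (ms : List Char) (acc : List Char) : List Char × List Char :=
  match ms with
  | [] => ([], acc)
  | m :: rest => if m = '9' then (m :: rest, acc) else emitLits rest (acc ++ [m])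

-- goB: B's outer for-loop over the text characters
def goB (ts : List Char) (ms : List Char) (acc : List Char) : List Char :=
  match ts with
  | [] => acc
  | ch :: trest =>
    match emitLits ms acc with
    | ([], acc') => acc'
    | (_ :: mrest, acc') => goB trest mrest (acc' ++ [ch])

def formatarMask_alt (text : String) (mask : String) : String :=
  String.ofList (goB text.toList mask.toList [])

-- ===== PRECONDITION & SPEC =====
def Spec_formatarMask (text : String) (mask : String) (out : String) : Prop := out = formatarMask_alt text mask
instance (text : String) (mask : String) (out : String) : Decidable (Spec_formatarMask text mask out) := by unfold Spec_formatarMask; infer_instance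

-- ===== CLAIM (what is proved, stated in full; the proofs are below) =====
def Claim_equal_formatarMask : Prop := ∀ (text : String) (mask : String), Dom_formatarMask text mask → Spec_formatarMask text mask (formatarMask text mask)

-- ===== LEMMAS AND PROOFS =====

theorem goB_nil_mask (ts : List Char) (acc : List Char) : goB ts [] acc = acc := by
  cases ts <;> simp [goB, emitLits]

theorem goB_lit (ts : List Char) (m : Char) (rest acc : List Char) (hm : m ≠ '9') (hts : ts ≠ []) :
    goB ts (m :: rest) acc = goB ts rest (acc ++ [m]) := by
  cases ts with
  | nil => exact absurd rfl hts
  | cons ch trest => simp [goB, emitLits, hm]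

theorem goA_eq_goB (text : List Char) (ms : List Char) (i : Nat) (acc : List Char) :
    goA text ms i acc = goB (text.drop i) ms acc := by
  induction ms generalizing i acc with
  | nil => simp [goA, goB_nil_mask]
  | cons m rest ih =>
    by_cases hm : m = '9'
    · subst hm
      by_cases hi : i < text.length
      · have hdrop : text.drop i = text[i] :: text.drop (i + 1) :=
          List.drop_eq_getElem_cons hi
        rw [hdrop]
        simp [goA, hi, goB, emitLits, ih]
      · have hdrop : text.drop i = [] := List.drop_eq_nil_of_le (by omega)
        simp [goA, hi, hdrop, goB]
    · by_cases hi : i < text.length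
      · have hts : text.drop i ≠ [] := by
          simp [List.drop_eq_nil_iff]; omega
        rw [goA]
        simp only [hm, if_false, hi, if_true, ih, goB_lit _ _ _ _ hm hts]
      · have hdrop : text.drop i = [] := List.drop_eq_nil_of_le (by omega)
        rw [goA]
        simp [hm, hi, ih, hdrop, goB]

-- ===== VERDICT (by name: the statement is the Claim_ definition above) =====
theorem formatarMask_spec : Claim_equal_formatarMask := by
  intro text mask _
  unfold Spec_formatarMask formatarMask formatarMask_alt
  rw [goA_eq_goB]
  rfl
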